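-- pv_equiv track=rewrite | github.com/ana-vic-ps/NovasTecnologiasAtividades | revisao/exerc_2.py | elementos_unicos
-- ===== SOURCE A (Python) =====
-- def elementos_unicos(listas):
--     elementos_unicos = []
--     for lista in listas:
--         contador = {}
--         for elemento in lista:
--             contador[elemento] = contador.get(elemento, 0) + 1
--         unicos = [elemento for elemento, contagem in contador.items() if contagem == 1]
--         elementos_unicos.append(unicos)
--     return elementos_unicos
-- ===== SOURCE B (Python) =====
-- def elementos_unicos(listas):
--     resultado = []
--     for lista in listas:
--         seen = set()
--         dups = set()
--         for x in lista:
--             if x in seen: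
--                 dups.add(x)
--             seen.add(x)
--         resultado.append([x for x in lista if x in seen and x not in dups])
--     return resultado
-- ===== Notes on version B (the rewrite author's own statement) =====
-- stated objective: idiomatic
-- what changed: Replaced the per-sublist counting dict and items() scan by a one-pass seen/dups pair of sets followed by a filter of the original sublist (unique elements occur once, so first-occurrence order is preserved).
import Mathlib
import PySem

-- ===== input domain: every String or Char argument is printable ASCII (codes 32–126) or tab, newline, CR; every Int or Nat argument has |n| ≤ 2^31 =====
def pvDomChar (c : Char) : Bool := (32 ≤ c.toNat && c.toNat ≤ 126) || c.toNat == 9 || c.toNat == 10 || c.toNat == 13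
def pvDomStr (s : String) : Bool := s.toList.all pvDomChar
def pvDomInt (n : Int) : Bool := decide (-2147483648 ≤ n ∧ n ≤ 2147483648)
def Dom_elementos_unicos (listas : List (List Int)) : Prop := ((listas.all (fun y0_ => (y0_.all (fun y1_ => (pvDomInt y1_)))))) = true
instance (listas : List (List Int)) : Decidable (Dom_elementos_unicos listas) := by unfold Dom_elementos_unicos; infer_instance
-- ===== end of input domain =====

-- B replaces A's per-sublist counting dict + items() scan by a one-pass seen/dups pair of
-- sets followed by a filter of the original sublist (same cost, more idiomatic).


-- ===== PORT A =====
-- for each lista: contador[e] = contador.get(e, 0) + 1, then keep keys with count 1 (items order)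
def elementos_unicos (listas : List (List Int)) : List (List Int) :=
  listas.foldl (fun acc lista =>
    let contador : PySem.Dict Int Int :=
      lista.foldl (fun d elemento => d.insert elemento (d.getD elemento 0 + 1)) PySem.Dict.empty
    let unicos := (contador.items.filter (fun p => p.2 == (1 : Int))).map (·.1)
    acc ++ [unicos]) []

-- ===== PORT B =====
-- one pass building (seen, dups); then filter the original lista
def elementos_unicos_alt (listas : List (List Int)) : List (List Int) :=
  listas.foldl (fun acc lista =>
    let sd :=
      lista.foldl (fun (sd : PySem.Set Int × PySem.Set Int) x =>
        (PySem.Set.add sd.1 x, if PySem.Set.contains sd.1 x then PySem.Set.add sd.2 x else sd.2))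
        (PySem.Set.empty, PySem.Set.empty)
    acc ++ [lista.filter (fun x => PySem.Set.contains sd.1 x && !PySem.Set.contains sd.2 x)]) []

-- ===== PRECONDITION & SPEC =====
def Spec_elementos_unicos (listas : List (List Int)) (out : List (List Int)) : Prop := out = elementos_unicos_alt listas
instance (listas : List (List Int)) (out : List (List Int)) : Decidable (Spec_elementos_unicos listas out) := by unfold Spec_elementos_unicos; infer_instance

-- ===== CLAIM (what is proved, stated in full; the proofs are below) =====
def Claim_equal_elementos_unicos : Prop := ∀ (listas : List (List Int)), Dom_elementos_unicos listas → Spec_elementos_unicos listas (elementos_unicos listas)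

-- ===== LEMMAS AND PROOFS =====

-- A's counting loop is PySem.Dict.counter
lemma counterA (lista : List Int) :
    lista.foldl (fun d elemento => d.insert elemento (d.getD elemento 0 + 1)) PySem.Dict.empty
      = PySem.Dict.counter lista := PySem.Dict.foldl_insert_getD_add_one_eq_counter lista

-- generalized: filtering a foldl of Set.add by a predicate true only on globally-unique elements
lemma filter_foldl_add (l : List Int) (p : Int → Bool) :
    ∀ s : List Int, (∀ x, p x = true → l.count x + s.count x ≤ 1) →
      (l.foldl PySem.Set.add s).filter p = s.filter p ++ l.filter p := by
  induction l with
  | nil => intro s _; simp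
  | cons a t ih =>
    intro s h
    by_cases hpa : p a = true
    · have hc := h a hpa
      have hta : t.count a = 0 := by simp at hc; omega
      have hsa : a ∉ s := by
        intro hm; have := List.count_pos_iff.mpr hm; simp at hc; omega
      have hadd : PySem.Set.add s a = s ++ [a] := PySem.Set.add_of_not_mem hsa
      simp only [List.foldl_cons, hadd]
      rw [ih (s ++ [a]) ?_]
      · simp [List.filter_append, hpa]
      · intro x hpx
        by_cases hx : x = a
        · subst hx; simp [hta, List.count_append, List.count_eq_zero.mpr hsa]
        · have := h x hpx
          simp [List.count_cons, List.count_append, hx] at *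
          omega
    · simp only [List.foldl_cons]
      have hcnt : ∀ x, p x = true → t.count x + (PySem.Set.add s a).count x ≤ 1 := by
        intro x hpx
        have hx : x ≠ a := by intro hxa; rw [hxa] at hpx; exact hpa hpx
        have := h x hpx
        rw [PySem.Set.add_eq_ite]
        split
        · simp [Ne.symm hx] at *; omega
        · simp [List.count_cons, List.count_append, hx] at *; omega
      rw [ih _ hcnt]
      have : (PySem.Set.add s a).filter p = s.filter p := by
        rw [PySem.Set.add_eq_ite]; split
        · rfl
        · simp [List.filter_append, hpa]
      rw [this]
      simp [hpa]

-- A's per-sublist value: the count-1 elements of lista, in first-occurrence order,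
-- equal lista filtered by "occurs exactly once"
lemma perListA (lista : List Int) :
    ((PySem.Dict.counter lista).items.filter (fun p => p.2 == (1 : Int))).map (·.1)
      = lista.filter (fun x => decide (lista.count x = 1)) := by
  rw [PySem.Dict.items_counter]
  rw [List.filter_map, List.map_map]
  have hfun : ((fun (p : Int × Int) => p.1) ∘ fun k => (k, (lista.count k : Int))) = id := rfl
  rw [hfun, List.map_id]
  have hpred : ((fun p => p.2 == (1 : Int)) ∘ fun k => (k, (lista.count k : Int)))
      = fun x => decide (lista.count x = 1) := by
    funext x
    simp only [Function.comp_apply]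
    rw [Bool.eq_iff_iff]
    simp only [beq_iff_eq, decide_eq_true_eq]
    omega
  rw [hpred]
  rw [show PySem.Set.ofList lista = lista.foldl PySem.Set.add [] from PySem.Set.ofList_eq_foldl lista]
  rw [filter_foldl_add lista _ [] (by intro x hx; simp at hx ⊢; omega)]
  simp

-- membership invariant of B's seen/dups loop
lemma loop_mem (l : List Int) :
    ∀ (s d : List Int) (x : Int),
      (x ∈ (l.foldl (fun (sd : PySem.Set Int × PySem.Set Int) y =>
          (PySem.Set.add sd.1 y, if PySem.Set.contains sd.1 y then PySem.Set.add sd.2 y else sd.2))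
          (s, d)).1 ↔ x ∈ s ∨ x ∈ l) ∧
      (x ∈ (l.foldl (fun (sd : PySem.Set Int × PySem.Set Int) y =>
          (PySem.Set.add sd.1 y, if PySem.Set.contains sd.1 y then PySem.Set.add sd.2 y else sd.2))
          (s, d)).2 ↔ x ∈ d ∨ (x ∈ s ∧ x ∈ l) ∨ 2 ≤ l.count x) := by
  induction l with
  | nil => intro s d x; simp
  | cons a t ih =>
    intro s d x
    simp only [List.foldl_cons]
    obtain ⟨ih1, ih2⟩ := ih (PySem.Set.add s a) (if PySem.Set.contains s a then PySem.Set.add d a else d) x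
    refine ⟨?_, ?_⟩
    · rw [ih1, PySem.Set.mem_add]
      simp only [List.mem_cons]
      tauto
    · rw [ih2]
      by_cases ha : a ∈ s
      · rw [if_pos ((PySem.Set.contains_iff s a).mpr ha)]
        rw [PySem.Set.mem_add, PySem.Set.mem_add]
        by_cases hx : x = a
        · subst hx
          have hc : (x :: t).count x = t.count x + 1 := by simp
          simp only [List.mem_cons, hc]
          constructor
          · intro _; exact Or.inr (Or.inl ⟨ha, by tauto⟩)
          · intro _; exact Or.inl (by tauto)
        · have hc : (a :: t).count x = t.count x := by simp [Ne.symm hx]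
          simp only [List.mem_cons, hc]
          tauto
      · rw [if_neg (by rw [PySem.Set.contains_iff]; exact fun h => ha h)]
        rw [PySem.Set.mem_add]
        by_cases hx : x = a
        · subst hx
          have hc : (x :: t).count x = t.count x + 1 := by simp
          simp only [List.mem_cons, hc]
          constructor
          · rintro (h | h | h)
            · exact Or.inl h
            · rcases h.1 with hs | _
              · exact absurd hs ha
              · have : 0 < t.count x := List.count_pos_iff.mpr h.2
                exact Or.inr (Or.inr (by omega))
            · exact Or.inr (Or.inr (by omega))
          · rintro (h | h | h)
            · exact Or.inl h
            · exact absurd h.1 ha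
            · have h1 : 1 ≤ t.count x := by omega
              have : x ∈ t := List.count_pos_iff.mp (by omega)
              exact Or.inr (Or.inl ⟨by tauto, this⟩)
        · have hc : (a :: t).count x = t.count x := by simp [Ne.symm hx]
          simp only [List.mem_cons, hc]
          tauto

-- B's per-sublist value equals the same count-1 filter
lemma perListB (lista : List Int) :
    (lista.filter (fun x =>
        PySem.Set.contains (lista.foldl (fun (sd : PySem.Set Int × PySem.Set Int) y =>
          (PySem.Set.add sd.1 y, if PySem.Set.contains sd.1 y then PySem.Set.add sd.2 y else sd.2))
          (PySem.Set.empty, PySem.Set.empty)).1 x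
        && !PySem.Set.contains (lista.foldl (fun (sd : PySem.Set Int × PySem.Set Int) y =>
          (PySem.Set.add sd.1 y, if PySem.Set.contains sd.1 y then PySem.Set.add sd.2 y else sd.2))
          (PySem.Set.empty, PySem.Set.empty)).2 x))
      = lista.filter (fun x => decide (lista.count x = 1)) := by
  apply List.filter_congr
  intro x hx
  obtain ⟨h1, h2⟩ := loop_mem lista PySem.Set.empty PySem.Set.empty x
  simp only [PySem.Set.empty, List.not_mem_nil, false_or, false_and] at h1 h2
  have hcount : 0 < lista.count x := List.count_pos_iff.mpr hx
  have hs : PySem.Set.contains (lista.foldl (fun (sd : PySem.Set Int × PySem.Set Int) y =>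
      (PySem.Set.add sd.1 y, if PySem.Set.contains sd.1 y then PySem.Set.add sd.2 y else sd.2))
      (PySem.Set.empty, PySem.Set.empty)).1 x = true := by
    rw [PySem.Set.contains_iff]
    exact h1.mpr hx
  rw [hs]
  by_cases hge : 2 ≤ lista.count x
  · have hd : PySem.Set.contains (lista.foldl (fun (sd : PySem.Set Int × PySem.Set Int) y =>
        (PySem.Set.add sd.1 y, if PySem.Set.contains sd.1 y then PySem.Set.add sd.2 y else sd.2))
        (PySem.Set.empty, PySem.Set.empty)).2 x = true := by
      rw [PySem.Set.contains_iff]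
      exact h2.mpr hge
    rw [hd]
    simp
    omega
  · have hd : PySem.Set.contains (lista.foldl (fun (sd : PySem.Set Int × PySem.Set Int) y =>
        (PySem.Set.add sd.1 y, if PySem.Set.contains sd.1 y then PySem.Set.add sd.2 y else sd.2))
        (PySem.Set.empty, PySem.Set.empty)).2 x = false := by
      rw [← Bool.not_eq_true, PySem.Set.contains_iff]
      intro hm
      exact hge (h2.mp hm)
    rw [hd]
    simp
    omega

-- ===== VERDICT (by name: the statement is the Claim_ definition above) =====
theorem elementos_unicos_spec : Claim_equal_elementos_unicos := by
  intro listas _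
  unfold Spec_elementos_unicos elementos_unicos elementos_unicos_alt
  rw [PySem.List.foldl_append_singleton_eq_map, PySem.List.foldl_append_singleton_eq_map]
  apply List.map_congr_left
  intro lista _
  simp only [counterA]
  rw [perListA, perListB]
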